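-- pv_equiv track=rewrite | github.com/josihosi/Cataclysm-AOL | tools/llm_runner/npc_harness.py | extract_lenient_csv
-- ===== SOURCE A (Python) =====
-- from typing import Dict, Iterable, List, Optional, Tuple
--
-- ALLOWED_ACTIONS = [
--     "wait_here",
--     "hold_position",
--     "follow_close",
--     "follow_far",
--     "equip_gun",
--     "equip_melee",
--     "equip_bow",
--     "panic_on",
--     "panic_off",
--     "look_around",
--     "look_inventory",
--     "idle",
-- ]
--
-- def extract_lenient_csv(payload: str) -> Tuple[bool, str, List[str], str]:
--     speech = ""
--     actions: List[str] = []
--     if "|" in payload: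
--         speech = payload.split("|", 1)[0].strip()
--     else:
--         first_quote = payload.find('"')
--         if first_quote == -1:
--             return False, "", [], ""
--         pos = first_quote + 1
--         collected: List[str] = []
--         while pos < len(payload):
--             char = payload[pos]
--             if char == '"':
--                 if pos + 1 < len(payload) and payload[pos + 1] == '"':
--                     collected.append('"')
--                     pos += 2
--                     continue
--                 pos += 1
--                 break
--             collected.append(char)
--             pos += 1
--         speech = "".join(collected).strip()
--     if not speech:
--         return False, "", [], ""
--     lowered = payload.lower()
--     for action in ALLOWED_ACTIONS:
--         start = lowered.find(action)
--         while start != -1: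
--             left_ok = start == 0 or (not lowered[start - 1].isalnum() and lowered[start - 1] != '_')
--             end = start + len(action)
--             right_ok = end >= len(lowered) or (not lowered[end].isalnum() and lowered[end] != '_')
--             if left_ok and right_ok:
--                 actions.append(action)
--                 return True, speech, actions, "Used lenient CSV parsing."
--             start = lowered.find(action, end)
--     actions.append("idle")
--     return True, speech, actions, "Used lenient CSV parsing."
-- ===== SOURCE B (Python) =====
-- from typing import List, Tuple
--
-- ALLOWED_ACTIONS = [
--     "wait_here",
--     "hold_position",
--     "follow_close",
--     "follow_far",
--     "equip_gun",
--     "equip_melee",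
--     "equip_bow",
--     "panic_on",
--     "panic_off",
--     "look_around",
--     "look_inventory",
--     "idle",
-- ]
--
-- def _word_tokens(s: str) -> List[str]:
--     # one pass: maximal runs of word characters (alnum or '_')
--     toks: List[str] = []
--     cur = ""
--     for ch in s:
--         if ch.isalnum() or ch == "_":
--             cur += ch
--         else:
--             if cur:
--                 toks.append(cur)
--             cur = ""
--     if cur:
--         toks.append(cur)
--     return toks
--
-- def extract_lenient_csv(payload: str) -> Tuple[bool, str, List[str], str]:
--     # speech extraction (unchanged logic)
--     if "|" in payload:
--         speech = payload.split("|", 1)[0].strip()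
--     else:
--         first_quote = payload.find('"')
--         if first_quote == -1:
--             return False, "", [], ""
--         pos = first_quote + 1
--         collected: List[str] = []
--         while pos < len(payload):
--             char = payload[pos]
--             if char == '"':
--                 if pos + 1 < len(payload) and payload[pos + 1] == '"':
--                     collected.append('"')
--                     pos += 2
--                     continue
--                 pos += 1
--                 break
--             collected.append(char)
--             pos += 1
--         speech = "".join(collected).strip()
--     if not speech:
--         return False, "", [], ""
--     # action: tokenize once, then first allowed action that is a whole token
--     toks = _word_tokens(payload.lower())
--     for action in ALLOWED_ACTIONS:
--         if action in toks:
--             return True, speech, [action], "Used lenient CSV parsing."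
--     return True, speech, ["idle"], "Used lenient CSV parsing."
-- ===== Notes on version B (the rewrite author's own statement) =====
-- stated objective: alternative
-- what changed: Action detection: instead of scanning the lowered payload with find() per action and checking word boundaries at each hit, B tokenizes the lowered payload once into maximal runs of alnum/underscore characters and returns the first allowed action that equals a whole token.
import Mathlib
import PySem

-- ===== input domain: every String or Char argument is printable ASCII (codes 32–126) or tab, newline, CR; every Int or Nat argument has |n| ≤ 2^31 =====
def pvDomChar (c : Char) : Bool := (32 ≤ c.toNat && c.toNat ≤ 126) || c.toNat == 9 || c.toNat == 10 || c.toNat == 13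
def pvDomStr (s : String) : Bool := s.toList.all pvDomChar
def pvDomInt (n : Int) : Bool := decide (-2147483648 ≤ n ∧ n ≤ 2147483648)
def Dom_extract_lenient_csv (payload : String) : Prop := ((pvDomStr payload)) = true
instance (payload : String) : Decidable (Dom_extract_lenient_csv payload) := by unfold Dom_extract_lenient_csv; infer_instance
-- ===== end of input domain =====

-- B re-implements the action search by tokenizing the lowered payload once into maximal
-- alnum/underscore runs and taking the first allowed action equal to a whole token;
-- the speech-extraction part is unchanged.  Objective: alternative (same cost class).

-- ALLOWED_ACTIONS (module constant, shared by both programs)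
def pvAllowed : List (List Char) :=
  [ "wait_here".toList, "hold_position".toList, "follow_close".toList, "follow_far".toList,
    "equip_gun".toList, "equip_melee".toList, "equip_bow".toList, "panic_on".toList,
    "panic_off".toList, "look_around".toList, "look_inventory".toList, "idle".toList ]

-- speech extraction (identical code in A and in B, so one shared transliteration):
-- the while loop collecting the quoted text ("" is an escaped quote)
def pvQuoteLoop (cs : List Char) (pos : Nat) (collected : List Char) : List Char :=
  if pos < cs.length then
    let char := cs.getD pos ' '     -- in range: pos < cs.length
    if char = '"' then
      if cs[pos + 1]? = some '"' then pvQuoteLoop cs (pos + 2) (collected ++ ['"'])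
      else collected
    else pvQuoteLoop cs (pos + 1) (collected ++ [char])
  else collected
termination_by cs.length - pos

-- speech = …; none = the `return False, "", [], ""` when no quote is found
def pvSpeech (cs : List Char) : Option (List Char) :=
  if PySem.Chars.isIn ['|'] cs then
    some (PySem.Chars.strip (((PySem.Chars.splitMax? cs ['|'] 1).getD []).getD 0 []))
  else
    let fq := PySem.Chars.find cs ['"']
    if fq = -1 then none
    else some (PySem.Chars.strip (pvQuoteLoop cs (fq.toNat + 1) []))

-- ===== PORT A =====
-- findFrom range facts, needed for pvScan's termination
theorem pvFindFrom_range (low w : List Char) (k : Int) :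
    PySem.Chars.findFrom low w k none = -1 ∨
      (0 ≤ PySem.Chars.findFrom low w k none ∧
        PySem.Chars.findFrom low w k none ≤ (low.length : Int)) := by
  simp only [PySem.Chars.findFrom]
  generalize hst : (if k < 0 then if k + (low.length : Int) < 0 then 0 else k + (low.length : Int) else k) = st
  have hst0 : 0 ≤ st := by rw [← hst]; split_ifs <;> omega
  clear hst
  generalize hL : List.drop st.toNat (List.take (Int.toNat (low.length : Int)) low) = L
  split
  · left; rfl
  · rename_i h
    split
    · left; rfl
    · rename_i hr
      right
      have hlen : (L.length : Int) + st ≤ (low.length : Int) := by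
        rw [← hL]
        simp only [List.length_drop, List.length_take, Int.toNat_natCast, Nat.min_self]
        omega
      have h1 : -1 ≤ PySem.Chars.find L w := PySem.Chars.neg_one_le_find L w
      have h2 : PySem.Chars.find L w ≤ (L.length : Int) := PySem.Chars.find_le_length L w
      exact ⟨by omega, by omega⟩

theorem pvFindFrom_big (low w : List Char) (k : Nat) (hk : low.length ≤ k) (hw : w ≠ []) :
    PySem.Chars.findFrom low w (k : Int) none = -1 := by
  simp only [PySem.Chars.findFrom]
  have h0 : ¬ ((k : Int) < 0) := by omega
  rw [if_neg h0]
  split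
  · rfl
  · rename_i h
    have hkl : k = low.length := by omega
    subst hkl
    have hnil : List.drop (Int.toNat ((low.length : Nat) : Int)) (List.take (Int.toNat ((low.length : Nat) : Int)) low) = [] := by
      simp
    rw [hnil]
    rw [if_pos]
    rw [PySem.Chars.find_eq_neg_one_iff]
    intro hinf
    exact hw (List.eq_nil_of_infix_nil hinf)

theorem pvFindFrom_ge (low w : List Char) (k : Nat) (hk : k ≤ low.length)
    (h : PySem.Chars.findFrom low w (k : Int) none ≠ -1) :
    (k : Int) ≤ PySem.Chars.findFrom low w (k : Int) none :=
  (PySem.Chars.findFrom_natCast_spec low w k hk h).1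

-- the decreasing measure and argument for pvScan's while loop, kept outside the definition
def pvMeas (len : Nat) (start : Int) : Nat :=
  if start = -1 then 0 else if start < 0 then len + 3 else len + 2 - min start.toNat (len + 1)

theorem pvMeas_pos (len : Nat) (start : Int) (h : ¬ start = -1) : 0 < pvMeas len start := by
  unfold pvMeas
  rw [if_neg h]
  split_ifs
  · exact Nat.succ_pos _
  · exact Nat.sub_pos_of_lt (Nat.lt_succ_of_le (Nat.min_le_right _ _))

theorem pvScan_dec (low w : List Char) (start : Int)
    (hw : ¬ w.isEmpty = true) (h1 : ¬ start = -1) :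
    pvMeas low.length (PySem.Chars.findFrom low w ((start.toNat + w.length : Nat) : Int) none) <
      pvMeas low.length start := by
  have hw' : w ≠ [] := by simpa [List.isEmpty_iff] using hw
  have hwl : w.length ≠ 0 := by simpa using hw'
  rcases pvFindFrom_range low w ((start.toNat + w.length : Nat) : Int) with hr | ⟨hr0, hrle⟩
  · rw [hr, show pvMeas low.length (-1) = 0 from by unfold pvMeas; simp]
    exact pvMeas_pos low.length start h1
  · by_cases hsle : low.length ≤ start.toNat + w.length
    · exact absurd (pvFindFrom_big low w (start.toNat + w.length) hsle hw') (by omega)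
    · have hge := pvFindFrom_ge low w (start.toNat + w.length) (by omega) (by omega)
      generalize hgen : PySem.Chars.findFrom low w ((start.toNat + w.length : Nat) : Int) none = r at hr0 hrle hge ⊢
      unfold pvMeas
      rw [if_neg (by omega : ¬ r = -1), if_neg (by omega : ¬ r < 0), if_neg h1]
      have hb : r.toNat ≤ low.length := Int.toNat_le.mpr hrle
      have hab : start.toNat + w.length ≤ r.toNat := (Int.le_toNat hr0).mpr hge
      have hlt : low.length + 2 - min r.toNat (low.length + 1) < low.length + 2 - min start.toNat (low.length + 1) := by
        rw [Nat.min_eq_left (Nat.le_succ_of_le hb), Nat.min_eq_left (by omega)]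
        exact Nat.sub_lt_sub_left (by omega) (by omega)
      by_cases hneg : start < 0
      · rw [if_pos hneg]
        exact Nat.lt_succ_of_le (Nat.sub_le _ _)
      · rw [if_neg hneg]
        exact hlt

-- the inner `while start != -1` loop of A (w.isEmpty guard only makes the def total:
-- Python would never terminate there; it is never reached, every allowed action is nonempty)
def pvScan (low w : List Char) (start : Int) : Bool :=
  if _hw : w.isEmpty then false
  else if _h1 : start = -1 then false
  else
    let s := start.toNat
    let left_ok := s == 0 ||
      (!PySem.Chars.isalnum (low.getD (s - 1) ' ') && !(low.getD (s - 1) ' ' == '_'))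
    let e := s + w.length
    let right_ok := low.length ≤ e ||
      (!PySem.Chars.isalnum (low.getD e ' ') && !(low.getD e ' ' == '_'))
    if left_ok && right_ok then true
    else pvScan low w (PySem.Chars.findFrom low w ((e : Nat) : Int) none)
termination_by pvMeas low.length start
decreasing_by exact pvScan_dec low w start _hw _h1

-- the `for action in ALLOWED_ACTIONS` loop of A (returns the first matching action)
def pvALoop (low : List Char) : List (List Char) → Option (List Char)
  | [] => none
  | a :: rest =>
    if pvScan low a (PySem.Chars.find low a) then some a else pvALoop low rest

def extract_lenient_csv (payload : String) : Bool × String × List String × String :=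
  match pvSpeech payload.toList with
  | none => (false, "", [], "")
  | some sp =>
    if sp = [] then (false, "", [], "")
    else
      let low := PySem.Chars.lower payload.toList
      match pvALoop low pvAllowed with
      | some a => (true, String.ofList sp, [String.ofList a], "Used lenient CSV parsing.")
      | none => (true, String.ofList sp, ["idle"], "Used lenient CSV parsing.")

-- ===== PORT B =====
-- word character: alnum or underscore
def pvWC (c : Char) : Bool := PySem.Chars.isalnum c || c == '_'

-- one pass over the string: collect maximal runs of word characters (_word_tokens in Source B)
def pvTokStep (st : List (List Char) × List Char) (ch : Char) : List (List Char) × List Char :=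
  if pvWC ch then (st.1, st.2 ++ [ch])
  else if st.2 ≠ [] then (st.1 ++ [st.2], []) else (st.1, [])

def pvTokens (s : List Char) : List (List Char) :=
  let st := s.foldl pvTokStep ([], [])
  if st.2 ≠ [] then st.1 ++ [st.2] else st.1

def extract_lenient_csv_alt (payload : String) : Bool × String × List String × String :=
  match pvSpeech payload.toList with
  | none => (false, "", [], "")
  | some sp =>
    if sp = [] then (false, "", [], "")
    else
      let toks := pvTokens (PySem.Chars.lower payload.toList)
      match pvAllowed.find? (fun a => toks.contains a) with
      | some a => (true, String.ofList sp, [String.ofList a], "Used lenient CSV parsing.")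
      | none => (true, String.ofList sp, ["idle"], "Used lenient CSV parsing.")

-- ===== PRECONDITION & SPEC =====
def Spec_extract_lenient_csv (payload : String) (out : Bool × String × List String × String) : Prop := out = extract_lenient_csv_alt payload
instance (payload : String) (out : Bool × String × List String × String) : Decidable (Spec_extract_lenient_csv payload out) := by unfold Spec_extract_lenient_csv; infer_instance

-- ===== CLAIM (what is proved, stated in full; the proofs are below) =====
def Claim_equal_extract_lenient_csv : Prop := ∀ (payload : String), Dom_extract_lenient_csv payload → Spec_extract_lenient_csv payload (extract_lenient_csv payload)

-- ===== LEMMAS AND PROOFS =====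

-- a boundary occurrence of w at index i of low (index form)
def pvBnd (low w : List Char) (i : Nat) : Prop :=
  w <+: low.drop i ∧
  (i = 0 ∨ pvWC (low.getD (i - 1) ' ') = false) ∧
  (low.length ≤ i + w.length ∨ pvWC (low.getD (i + w.length) ' ') = false)

-- a boundary occurrence of w (decomposition form)
def pvOcc (low w : List Char) : Prop :=
  ∃ pre post, low = pre ++ w ++ post ∧
    pre.getLast?.all (fun c => !pvWC c) = true ∧
    post.head?.all (fun c => !pvWC c) = true

theorem pvBnd_le (low w : List Char) (i : Nat) (hw : w ≠ []) (h : w <+: low.drop i) :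
    i + w.length ≤ low.length := by
  have := h.length_le
  rw [List.length_drop] at this
  rcases Nat.lt_or_ge i low.length with hi | hi
  · omega
  · exfalso
    rw [List.drop_eq_nil_of_le hi] at h
    exact hw (List.prefix_nil.mp h)

theorem pvScan_iff (low w : List Char) (hw : w ≠ []) (hwc : w.all pvWC = true)
    (s : Nat) (hs : s ≤ low.length) :
    (pvScan low w (PySem.Chars.findFrom low w (s : Int) none) = true ↔
      ∃ i, s ≤ i ∧ pvBnd low w i) := by
  have hwe : w.isEmpty = false := by simpa [List.isEmpty_iff] using hw
  have hwl : 0 < w.length := List.length_pos_iff.mpr hw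
  obtain ⟨n, hn⟩ : ∃ n, low.length - s ≤ n := ⟨low.length - s, le_refl _⟩
  induction n generalizing s with
  | zero =>
    have hsl : s = low.length := by omega
    subst hsl
    rw [pvFindFrom_big low w low.length (le_refl _) hw]
    rw [show pvScan low w (-1) = false from by rw [pvScan]; simp [hwe]]
    simp only [Bool.false_eq_true, false_iff, not_exists]
    rintro i ⟨hsi, hbnd, -, -⟩
    have := pvBnd_le low w i hw hbnd
    omega
  | succ n ih =>
    by_cases hp : PySem.Chars.findFrom low w (s : Int) none = -1
    · rw [hp]
      rw [show pvScan low w (-1) = false from by rw [pvScan]; simp [hwe]]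
      simp only [Bool.false_eq_true, false_iff, not_exists]
      rintro i ⟨hsi, hbnd, -, -⟩
      have hninf : ¬ w <:+: low.drop s :=
        (PySem.Chars.findFrom_natCast_eq_neg_one_iff low w s hs).mp hp
      apply hninf
      have h1 : w <+: (low.drop s).drop (i - s) := by
        rw [List.drop_drop, show s + (i - s) = i from by omega]
        exact hbnd
      exact h1.isInfix.trans (List.drop_suffix _ _).isInfix
    · rcases pvFindFrom_range low w (s : Int) with h0 | ⟨hge0, hle⟩
      · exact absurd h0 hp
      · obtain ⟨hks, hpre, hmin⟩ := PySem.Chars.findFrom_natCast_spec low w s hs hp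
        have hsp : s ≤ (PySem.Chars.findFrom low w (s : Int) none).toNat := by omega
        have hple : (PySem.Chars.findFrom low w (s : Int) none).toNat + w.length ≤ low.length :=
          pvBnd_le low w _ hw hpre
        rw [pvScan.eq_def]
        rw [dif_neg (by simp [hwe] : ¬ w.isEmpty = true), dif_neg hp]
        set p : Nat := (PySem.Chars.findFrom low w (s : Int) none).toNat with hpdef
        simp only [← Bool.not_or]
        set cL : Char := low.getD (p - 1) ' ' with hcL
        set cR : Char := low.getD (p + w.length) ' ' with hcR
        have hLok : ((p == 0) || !(PySem.Chars.isalnum cL || cL == '_')) = true ↔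
            (p = 0 ∨ pvWC cL = false) := by
          simp [pvWC, Bool.or_eq_true]
        have hRok : ((decide (low.length ≤ p + w.length)) || !(PySem.Chars.isalnum cR || cR == '_')) = true ↔
            (low.length ≤ p + w.length ∨ pvWC cR = false) := by
          simp [pvWC, Bool.or_eq_true]
        by_cases hok : (((p == 0) || !(PySem.Chars.isalnum cL || cL == '_')) &&
            ((decide (low.length ≤ p + w.length)) || !(PySem.Chars.isalnum cR || cR == '_'))) = true
        · rw [if_pos hok]
          simp only [true_iff]
          obtain ⟨hL, hR⟩ := Bool.and_eq_true_iff.mp hok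
          exact ⟨p, hsp, hpre, hLok.mp hL, hRok.mp hR⟩
        · rw [if_neg hok]
          have he_le : p + w.length ≤ low.length := hple
          have hrec := ih (p + w.length) he_le (by omega)
          refine hrec.trans ?_
          constructor
          · rintro ⟨i, hi, hbnd⟩
            exact ⟨i, by omega, hbnd⟩
          · rintro ⟨i, hi, hbnd⟩
            refine ⟨i, ?_, hbnd⟩
            by_contra hlt
            rw [Nat.not_le] at hlt
            -- i < p + w.length
            rcases Nat.lt_or_ge i p with hip | hip
            · exact hmin i hi hip hbnd.1
            · rcases Nat.eq_or_lt_of_le hip with rfl | hip'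
              · -- i = p : the boundary checks would have succeeded
                exact hok (Bool.and_eq_true_iff.mpr ⟨hLok.mpr hbnd.2.1, hRok.mpr hbnd.2.2⟩)
              · -- p < i < p + w.length : low[i-1] is a character of w, hence a word char
                obtain ⟨t, ht⟩ := hpre
                have hj : i - 1 - p < w.length := by omega
                have hchar : low[i - 1]? = some w[i - 1 - p] := by
                  have h1 : low[i - 1]? = (low.drop p)[i - 1 - p]? := by
                    rw [List.getElem?_drop, show p + (i - 1 - p) = i - 1 from by omega]
                  rw [h1, ← ht, List.getElem?_append_left hj,
                      List.getElem?_eq_getElem hj]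
                have hwcj : pvWC w[i - 1 - p] = true := by
                  have := List.all_eq_true.mp hwc
                  exact this _ (List.getElem_mem hj)
                rcases hbnd.2.1 with h0 | hfalse
                · omega
                · rw [List.getD_eq_getElem?_getD, hchar] at hfalse
                  simp [hwcj] at hfalse


theorem pvTakeWhile_all {p : Char → Bool} {w : List Char} (h : w.all p = true) :
    w.takeWhile p = w := by
  induction w with
  | nil => rfl
  | cons a l ih => simp_all

theorem pvDropWhile_all {p : Char → Bool} {w : List Char} (h : w.all p = true) :
    w.dropWhile p = [] := by
  rw [List.dropWhile_eq_nil_iff]; simpa [List.all_eq_true] using h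

theorem pvHead_not {p : Char → Bool} {post : List Char}
    (h : post.head?.all (fun c => !p c) = true) : post.takeWhile p = [] := by
  cases post with
  | nil => rfl
  | cons x l => simp at h; simp [h]

theorem pvTakeWhile_decomp {p : Char → Bool} {w post : List Char}
    (hwc : w.all p = true) (hh : post.head?.all (fun c => !p c) = true) :
    (w ++ post).takeWhile p = w := by
  rw [List.takeWhile_append, pvTakeWhile_all hwc, if_pos rfl, pvHead_not hh, List.append_nil]

theorem pvHead_dropWhile (p : Char → Bool) (l : List Char) :
    (l.dropWhile p).head?.all (fun c => !p c) = true := by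
  have h := List.head?_dropWhile_not p l
  cases hh : (l.dropWhile p).head? with
  | none => rfl
  | some x => rw [hh] at h; simpa using h

theorem pvAll_takeWhile (p : Char → Bool) (l : List Char) : (l.takeWhile p).all p = true := by
  induction l with
  | nil => rfl
  | cons a l ih => rw [List.takeWhile_cons]; split_ifs with h <;> simp_all

def pvRuns : List Char → List (List Char)
  | [] => []
  | c :: cs =>
    if pvWC c then (c :: cs.takeWhile pvWC) :: pvRuns (cs.dropWhile pvWC)
    else pvRuns cs
termination_by s => s.length
decreasing_by
  · simpa using Nat.lt_succ_of_le (cs.length_dropWhile_le pvWC)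
  · simp

theorem pvFold_eq (s : List Char) : ∀ toks cur,
    (let st := s.foldl pvTokStep (toks, cur)
     if st.2 ≠ [] then st.1 ++ [st.2] else st.1) =
    toks ++ (if cur = [] then pvRuns s
             else (cur ++ s.takeWhile pvWC) :: pvRuns (s.dropWhile pvWC)) := by
  induction s with
  | nil =>
    intro toks cur
    by_cases hc : cur = [] <;> simp [pvRuns, hc]
  | cons c s ih =>
    intro toks cur
    simp only [List.foldl_cons]
    by_cases hp : pvWC c
    · rw [show pvTokStep (toks, cur) c = (toks, cur ++ [c]) from by simp [pvTokStep, hp]]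
      rw [ih toks (cur ++ [c])]
      by_cases hc : cur = [] <;> simp [pvRuns, hp, hc]
    · by_cases hc : cur = []
      · rw [show pvTokStep (toks, cur) c = (toks, []) from by simp [pvTokStep, hp, hc]]
        rw [ih toks []]
        simp [pvRuns, hp, hc]
      · rw [show pvTokStep (toks, cur) c = (toks ++ [cur], []) from by simp [pvTokStep, hp, hc]]
        rw [ih (toks ++ [cur]) []]
        simp [pvRuns, hp, hc]

theorem pvTokens_eq_runs (s : List Char) : pvTokens s = pvRuns s := by
  simpa [pvTokens] using pvFold_eq s [] []


theorem pvRuns_mem_iff (low : List Char) (w : List Char) (hw : w ≠ []) (hwc : w.all pvWC = true) :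
    (w ∈ pvRuns low ↔ pvOcc low w) := by
  induction low using pvRuns.induct with
  | case1 =>
    simp only [pvRuns, List.not_mem_nil, false_iff]
    rintro ⟨pre, post, heq, -, -⟩
    have hlen := congrArg List.length heq
    simp only [List.length_nil, List.length_append] at hlen
    exact hw (List.eq_nil_of_length_eq_zero (by omega))
  | case2 c cs hc ih =>
    rw [pvRuns, if_pos hc]
    have hlow : c :: cs = (c :: cs.takeWhile pvWC) ++ cs.dropWhile pvWC := by
      simpa using (List.takeWhile_append_dropWhile (p := pvWC) (l := cs)).symm
    simp only [List.mem_cons]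
    constructor
    · rintro (rfl | hmem)
      · exact ⟨[], cs.dropWhile pvWC, by simpa using hlow, rfl, pvHead_dropWhile pvWC cs⟩
      · rcases ih.mp hmem with ⟨pre', post', heq', hl', hh'⟩
        have hpre' : pre' ≠ [] := by
          rintro rfl
          have hhd := pvHead_dropWhile pvWC cs
          rw [heq'] at hhd
          cases w with
          | nil => exact hw rfl
          | cons a _ =>
            simp only [List.nil_append, List.cons_append, List.head?_cons, Option.all_some] at hhd
            have ha : pvWC a = true := by
              simp only [List.all_cons, Bool.and_eq_true] at hwc; exact hwc.1
            simp [ha] at hhd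
        refine ⟨(c :: cs.takeWhile pvWC) ++ pre', post', ?_, ?_, hh'⟩
        · rw [hlow, heq']
          try simp
        · rw [List.getLast?_append]
          cases hpl : pre'.getLast? with
          | none => exact absurd (by simpa using hpl) hpre'
          | some x => rw [hpl] at hl'; simpa using hl'
    · rintro ⟨pre, post, heq, hl, hh⟩
      cases hpre : pre with
      | nil =>
        left
        subst hpre
        have ht : (w ++ post).takeWhile pvWC = w := pvTakeWhile_decomp hwc hh
        have h2 : (c :: cs).takeWhile pvWC = w := by
          rw [heq]; simpa using ht
        rw [← h2, List.takeWhile_cons, if_pos hc]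
      | cons p0 pre0 =>
        right
        subst hpre
        have hpne : (p0 :: pre0) ≠ [] := by simp
        -- d = non-wordchar tail of pre is nonempty
        obtain ⟨x, hx⟩ : ∃ x, (p0 :: pre0).getLast? = some x :=
          ⟨_, List.getLast?_eq_some_getLast hpne⟩
        rw [hx] at hl
        simp only [Option.all_some, Bool.not_eq_eq_eq_not, Bool.not_true] at hl
        have hd : (p0 :: pre0).dropWhile pvWC ≠ [] := by
          intro hnil
          rw [List.dropWhile_eq_nil_iff] at hnil
          rw [hnil x (List.mem_of_getLast? hx)] at hl; cases hl
        obtain ⟨y, d', hyd⟩ : ∃ y d', (p0 :: pre0).dropWhile pvWC = y :: d' := by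
          cases hdd : (p0 :: pre0).dropWhile pvWC with
          | nil => exact absurd hdd hd
          | cons y d' => exact ⟨y, d', rfl⟩
        have hy : pvWC y = false := by
          have := pvHead_dropWhile pvWC (p0 :: pre0)
          rw [hyd] at this; simpa using this
        have hsplit : c :: cs =
            (p0 :: pre0).takeWhile pvWC ++ ((p0 :: pre0).dropWhile pvWC ++ w ++ post) := by
          calc c :: cs = (p0 :: pre0) ++ w ++ post := heq
            _ = ((p0 :: pre0).takeWhile pvWC ++ (p0 :: pre0).dropWhile pvWC) ++ w ++ post := by
                rw [List.takeWhile_append_dropWhile]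
            _ = (p0 :: pre0).takeWhile pvWC ++ ((p0 :: pre0).dropWhile pvWC ++ w ++ post) := by
                simp only [List.append_assoc]
        have hD : cs.dropWhile pvWC = (p0 :: pre0).dropWhile pvWC ++ w ++ post := by
          have h1 : (c :: cs).dropWhile pvWC = cs.dropWhile pvWC := by
            rw [List.dropWhile_cons, if_pos hc]
          rw [← h1, hsplit, List.dropWhile_append,
              if_pos (by rw [pvDropWhile_all (pvAll_takeWhile pvWC (p0 :: pre0))]; rfl)]
          rw [hyd]
          simp only [List.cons_append, List.dropWhile_cons, hy]
          try rfl
        apply ih.mpr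
        refine ⟨(p0 :: pre0).dropWhile pvWC, post, by rw [hD]; try simp, ?_, hh⟩
        have hpp : (p0 :: pre0) = (p0 :: pre0).takeWhile pvWC ++ (p0 :: pre0).dropWhile pvWC :=
          (List.takeWhile_append_dropWhile).symm
        have hgl : ((p0 :: pre0).dropWhile pvWC).getLast? = some x := by
          have := hx
          conv at this => lhs; rw [hpp]
          rw [List.getLast?_append] at this
          cases hdl : ((p0 :: pre0).dropWhile pvWC).getLast? with
          | none => exact absurd (by simpa using hdl) hd
          | some z => rw [hdl] at this; simpa using this
        rw [hgl]
        simpa using hl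
  | case3 c cs hc ih =>
    rw [pvRuns, if_neg hc]
    rw [ih]
    constructor
    · rintro ⟨pre, post, heq, hl, hh⟩
      refine ⟨c :: pre, post, by simp [heq], ?_, hh⟩
      rw [List.getLast?_cons]
      cases hpl : pre.getLast? with
      | none => simpa [hpl] using hc
      | some x => rw [hpl] at hl; simpa using hl
    · rintro ⟨pre, post, heq, hl, hh⟩
      cases hpre : pre with
      | nil =>
        exfalso
        subst hpre
        cases w with
        | nil => exact hw rfl
        | cons a t =>
          have hac2 : c = a := by simpa using congrArg List.head? heq
          have hpa : pvWC a = true := by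
            simp only [List.all_cons, Bool.and_eq_true] at hwc; exact hwc.1
          rw [← hac2] at hpa
          exact hc hpa
      | cons p0 pre0 =>
        subst hpre
        have hp0 : c = p0 := by simpa using congrArg List.head? heq
        subst hp0
        refine ⟨pre0, post, by simpa using heq, ?_, hh⟩
        rw [List.getLast?_cons] at hl
        cases hpl : pre0.getLast? with
        | none => rfl
        | some x => rw [hpl] at hl; simpa using hl

theorem pvBnd_iff_occ (low w : List Char) (hw : w ≠ []) :
    (∃ i, pvBnd low w i) ↔ pvOcc low w := by
  constructor
  · rintro ⟨i, hp, hl, hr⟩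
    have hile : i + w.length ≤ low.length := pvBnd_le low w i hw hp
    obtain ⟨t, ht⟩ := hp
    refine ⟨low.take i, t, ?_, ?_, ?_⟩
    · conv_rhs => rw [List.append_assoc, ht]
      rw [List.take_append_drop]
    · rcases Nat.eq_zero_or_pos i with rfl | hipos
      · simp
      · rcases hl with h0 | hgetd
        · omega
        · have hlen : (low.take i).getLast? = low[i - 1]? := by
            rw [List.getLast?_eq_getElem?, List.length_take, List.getElem?_take]
            rw [if_pos (by omega)]
            congr 1
            omega
          rw [hlen]
          have hx : low[i - 1]? = some low[i - 1] := List.getElem?_eq_getElem (by omega)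
          rw [hx]
          rw [List.getD_eq_getElem?_getD, hx] at hgetd
          simpa using hgetd
    · have htt : t = low.drop (i + w.length) := by
        have hdd : (low.drop i).drop w.length = t := by rw [← ht]; simp
        rw [← hdd, List.drop_drop]
      rcases hr with h0 | hgetd
      · rw [htt, List.drop_eq_nil_of_le h0]; rfl
      · rw [htt]
        have hhd : (low.drop (i + w.length)).head? = low[i + w.length]? := by
          rw [List.head?_eq_getElem?, List.getElem?_drop]
          simp
        rw [hhd]
        cases hx : low[i + w.length]? with
        | none => rfl
        | some x =>
          rw [List.getD_eq_getElem?_getD, hx] at hgetd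
          simpa using hgetd
  · rintro ⟨pre, post, heq, hl, hh⟩
    refine ⟨pre.length, ?_, ?_, ?_⟩
    · rw [heq, List.append_assoc, List.drop_left]
      exact ⟨post, rfl⟩
    · rcases List.eq_nil_or_concat pre with rfl | ⟨l, x, rfl⟩
      · left; rfl
      · right
        simp only [List.concat_eq_append] at hl heq ⊢
        rw [List.getLast?_concat] at hl
        have hidx : low[(l ++ [x]).length - 1]? = some x := by
          rw [heq]
          rw [List.getElem?_append_left (by simp)]
          simp
        rw [List.getD_eq_getElem?_getD, hidx]
        simpa using hl
    · cases post with
      | nil =>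
        left
        rw [heq]
        simp
      | cons y t =>
        right
        have hidx : low[pre.length + w.length]? = some y := by
          rw [heq, List.append_assoc]
          rw [List.getElem?_append_right (by simp)]
          rw [List.getElem?_append_right (by simp)]
          simp
        rw [List.getD_eq_getElem?_getD, hidx]
        simpa using hh


theorem pvPoint (low a : List Char) (ha : a ≠ []) (hwc : a.all pvWC = true) :
    pvScan low a (PySem.Chars.find low a) = (pvTokens low).contains a := by
  have h0 : PySem.Chars.findFrom low a ((0 : Nat) : Int) none = PySem.Chars.find low a := by
    simpa using PySem.Chars.findFrom_zero low a
  have hs := pvScan_iff low a ha hwc 0 (Nat.zero_le _)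
  rw [h0] at hs
  rw [Bool.eq_iff_iff, hs, pvTokens_eq_runs, List.contains_iff_mem,
      pvRuns_mem_iff low a ha hwc, ← pvBnd_iff_occ low a ha]
  simp

theorem pvLoop_eq (low : List Char) (l : List (List Char))
    (h : ∀ a ∈ l, pvScan low a (PySem.Chars.find low a) = (pvTokens low).contains a) :
    pvALoop low l = l.find? (fun a => (pvTokens low).contains a) := by
  induction l with
  | nil => rfl
  | cons a rest ih =>
    simp only [pvALoop, List.find?]
    rw [h a (by simp)]
    cases hc : (pvTokens low).contains a with
    | true => simp
    | false => simpa using ih (fun b hb => h b (by simp [hb]))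

-- ===== VERDICT (by name: the statement is the Claim_ definition above) =====
theorem extract_lenient_csv_spec : Claim_equal_extract_lenient_csv := by
  intro payload _
  unfold Spec_extract_lenient_csv extract_lenient_csv extract_lenient_csv_alt
  have hall : ∀ a ∈ pvAllowed, a ≠ [] ∧ a.all pvWC = true := by decide
  have h := pvLoop_eq (PySem.Chars.lower payload.toList) pvAllowed
    (fun a ha => pvPoint _ a (hall a ha).1 (hall a ha).2)
  cases pvSpeech payload.toList with
  | none => rfl
  | some sp =>
    by_cases hsp : sp = [] <;> simp [hsp, h]
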